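-- pv_equiv track=rewrite | github.com/AlanovAibek/homework_3_python_code | produce_and_save_statistics.py | get_trigrams
-- ===== SOURCE A (Python) =====
-- def get_trigrams(tokens):
--     first_token, second_token = '$', '$'
--     for third_token in tokens:
--         yield first_token, second_token, third_token
--         if third_token in '.?!':
--             yield second_token, third_token, '$'
--             yield third_token, '$', '$'
--             first_token, second_token = '$', '$'
--         else:
--             first_token, second_token = second_token, third_token
-- ===== SOURCE B (Python) =====
-- def get_trigrams(tokens):
--     group = []
--     for t in tokens:
--         group.append(t)
--         if t in '.?!':
--             padded = ['$', '$'] + group + ['$', '$']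
--             for i in range(len(padded) - 2):
--                 yield padded[i], padded[i + 1], padded[i + 2]
--             group = []
--     padded = ['$', '$'] + group
--     for i in range(len(padded) - 2):
--         yield padded[i], padded[i + 1], padded[i + 2]
-- ===== Notes on version B (the rewrite author's own statement) =====
-- stated objective: alternative
-- what changed: B replaces A's rolling (first,second) state machine by a grouping decomposition: it collects tokens into sentence groups, pads each terminated group with '$','$' on both sides (the trailing unterminated group only in front), and yields every consecutive 3-window of the padded list.
import Mathlib
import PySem

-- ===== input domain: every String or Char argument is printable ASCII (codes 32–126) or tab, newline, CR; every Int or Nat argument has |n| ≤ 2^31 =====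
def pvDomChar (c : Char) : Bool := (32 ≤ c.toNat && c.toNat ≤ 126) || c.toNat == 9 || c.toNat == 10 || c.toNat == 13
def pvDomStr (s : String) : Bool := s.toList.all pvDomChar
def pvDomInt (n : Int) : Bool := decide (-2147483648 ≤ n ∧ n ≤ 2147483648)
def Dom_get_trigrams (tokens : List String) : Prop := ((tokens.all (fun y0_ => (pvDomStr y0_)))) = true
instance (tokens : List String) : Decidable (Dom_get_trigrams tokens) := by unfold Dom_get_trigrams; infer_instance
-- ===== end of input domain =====

-- B replaces A's rolling (first,second) state machine by a sentence-grouping decomposition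
-- (pad each group with '$' and take consecutive 3-windows); alternative structure, same O(n) cost.


-- ===== PORT A =====
-- A's loop: state (first_token, second_token), one yield per token, three yields and a reset
-- on a terminator ('third_token in ".?!"' is Python substring membership → PySem.Str.isIn).
def goA : List String → String × String → List (String × String × String)
  | [], _ => []
  | t :: ts, (f, s) =>
    if PySem.Str.isIn t ".?!" then
      (f, s, t) :: (s, t, "$") :: (t, "$", "$") :: goA ts ("$", "$")
    else
      (f, s, t) :: goA ts (s, t)

def get_trigrams (tokens : List String) : List (String × String × String) :=
  goA tokens ("$", "$")

-- ===== PORT B =====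
-- every consecutive 3-window of a list (Source B's 'for i in range(len(padded)-2)' loop)
def windows3 : List String → List (String × String × String)
  | a :: b :: c :: rest => (a, b, c) :: windows3 (b :: c :: rest)
  | _ => []

-- Source B's loop: accumulate the current sentence group; on a terminator emit the 3-windows of
-- the group padded on both sides and reset; at the end pad the leftover group only in front.
def goB : List String → List String → List (String × String × String)
  | [], group => windows3 (["$", "$"] ++ group)
  | t :: ts, group =>
    if PySem.Str.isIn t ".?!" then
      windows3 (["$", "$"] ++ (group ++ [t]) ++ ["$", "$"]) ++ goB ts []
    else
      goB ts (group ++ [t])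

def get_trigrams_alt (tokens : List String) : List (String × String × String) :=
  goB tokens []

-- ===== PRECONDITION & SPEC =====
def Spec_get_trigrams (tokens : List String) (out : List (String × String × String)) : Prop := out = get_trigrams_alt tokens
instance (tokens : List String) (out : List (String × String × String)) : Decidable (Spec_get_trigrams tokens out) := by unfold Spec_get_trigrams; infer_instance

-- ===== CLAIM (what is proved, stated in full; the proofs are below) =====
def Claim_equal_get_trigrams : Prop := ∀ (tokens : List String), Dom_get_trigrams tokens → Spec_get_trigrams tokens (get_trigrams tokens)

-- ===== LEMMAS AND PROOFS =====

-- last two elements of f::s::g, as A's rolling state computes them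
def last2 (g : List String) (fs : String × String) : String × String :=
  g.foldl (fun p x => (p.2, x)) fs

theorem last2_append (g : List String) (fs : String × String) (y : String) :
    last2 (g ++ [y]) fs = ((last2 g fs).2, y) := by
  simp [last2]

-- appending one element to a list of length ≥ 2 adds exactly one window, built from last2
theorem windows3_append (g : List String) (f s y : String) :
    windows3 (f :: s :: g ++ [y]) =
      windows3 (f :: s :: g) ++ [((last2 g (f, s)).1, (last2 g (f, s)).2, y)] := by
  induction g generalizing f s with
  | nil => simp [windows3, last2]
  | cons a g ih => simpa [windows3, last2] using ih s a

-- main invariant: B with pending group g equals the windows already implied by g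
-- followed by A running from the matching rolling state
theorem goB_eq (ts : List String) : ∀ g : List String,
    goB ts g = windows3 ("$" :: "$" :: g) ++ goA ts (last2 g ("$", "$")) := by
  induction ts with
  | nil => intro g; simp [goB, goA]
  | cons t ts ih =>
    intro g
    by_cases h : PySem.Str.isIn t ".?!" = true
    · have e1 := windows3_append g "$" "$" t
      have e2 := windows3_append (g ++ [t]) "$" "$" "$"
      have e3 := windows3_append (g ++ [t] ++ ["$"]) "$" "$" "$"
      simp only [goB, goA, h, if_pos, ih]
      simp only [List.cons_append, List.nil_append, List.append_assoc] at e1 e2 e3 ⊢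
      rw [e3, e2, e1]
      simp [last2, windows3]
    · have e1 := windows3_append g "$" "$" t
      simp only [goB, goA, h, ih, Bool.false_eq_true, if_false]
      simp only [List.cons_append] at e1 ⊢
      rw [e1, last2_append]
      simp

-- ===== VERDICT (by name: the statement is the Claim_ definition above) =====
theorem get_trigrams_spec : Claim_equal_get_trigrams := by
  intro tokens _
  unfold Spec_get_trigrams get_trigrams get_trigrams_alt
  simpa [last2, windows3] using (goB_eq tokens []).symm
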